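-- pv_equiv track=rewrite | github.com/rajeshh-1/teste_repository2 | audit_polymarket_resolution.py | unique_non_empty_upper
-- ===== SOURCE A (Python) =====
-- from typing import Dict, List, Optional, Tuple
--
-- def unique_non_empty_upper(rows: List[Dict[str, str]], key: str) -> List[str]:
--     values = sorted(
--         {
--             str(row.get(key) or "").strip().upper()
--             for row in rows
--             if str(row.get(key) or "").strip()
--         }
--     )
--     return values
-- ===== SOURCE B (Python) =====
-- def unique_non_empty_upper(rows, key):
--     vals = []
--     for row in rows:
--         cleaned = str(row.get(key) or "").strip()
--         if cleaned:
--             vals.append(cleaned.upper())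
--     vals.sort()
--     out = []
--     for v in vals:
--         if out and out[-1] == v:
--             continue
--         out.append(v)
--     return out
-- ===== Notes on version B (the rewrite author's own statement) =====
-- stated objective: alternative
-- what changed: Replaces the hash-set comprehension + sort with a plain list collected in one loop, an in-place sort, and a single adjacent-duplicate-removal pass over the sorted list (sort-then-scan dedup instead of a set).
import Mathlib
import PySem

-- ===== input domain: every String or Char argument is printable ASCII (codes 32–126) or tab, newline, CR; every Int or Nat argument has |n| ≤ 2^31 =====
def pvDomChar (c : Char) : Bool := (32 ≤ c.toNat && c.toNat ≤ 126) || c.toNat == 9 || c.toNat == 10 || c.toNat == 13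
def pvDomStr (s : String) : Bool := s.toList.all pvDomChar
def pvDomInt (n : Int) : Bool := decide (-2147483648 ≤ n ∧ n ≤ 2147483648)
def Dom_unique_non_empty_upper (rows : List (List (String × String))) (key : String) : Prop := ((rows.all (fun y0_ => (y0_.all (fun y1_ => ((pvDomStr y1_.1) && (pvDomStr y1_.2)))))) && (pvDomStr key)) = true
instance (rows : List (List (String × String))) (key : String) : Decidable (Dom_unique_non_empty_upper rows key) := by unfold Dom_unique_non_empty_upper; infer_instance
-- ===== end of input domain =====

-- B replaces A's hash-set comprehension + sort by collect-into-list, sort, then one adjacent-duplicate-removal pass (sort-then-scan dedup); return values proved equal.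


-- str(row.get(key) or "") : dict lookup is first match in the association list (type convention);
-- get gives None for a missing key and 'x or ""' maps None and "" to "", so the result is the found value or "".
-- Exact on the stated domain (values are strings, so str() is the identity). Used by both ports.
def pvGetOrEmpty (row : List (String × String)) (key : String) : String :=
  ((row.find? (fun p => p.1 == key)).map (fun p => p.2)).getD ""

-- ===== PORT A =====
-- sorted({str(row.get(key) or "").strip().upper() for row in rows if str(row.get(key) or "").strip()})
def unique_non_empty_upper (rows : List (List (String × String))) (key : String) : List String :=
  PySem.List.sorted
    (PySem.Set.ofList
      ((rows.filter (fun row => PySem.Str.strip (pvGetOrEmpty row key) ≠ "")).map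
        (fun row => PySem.Str.upper (PySem.Str.strip (pvGetOrEmpty row key)))))
    (fun x => x) false

-- ===== PORT B =====
-- first loop: vals.append(cleaned.upper()) when cleaned is truthy
def pvCollectB (rows : List (List (String × String))) (key : String) : List String :=
  rows.foldl
    (fun vals row =>
      let cleaned := PySem.Str.strip (pvGetOrEmpty row key)
      if cleaned = "" then vals else vals ++ [PySem.Str.upper cleaned])
    []

-- second loop: skip v when out is non-empty and out[-1] == v, else append
def pvDedupStep (out : List String) (v : String) : List String :=
  if out ≠ [] ∧ out.getLast? = some v then out else out ++ [v]

def unique_non_empty_upper_alt (rows : List (List (String × String))) (key : String) : List String :=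
  (PySem.List.sorted (pvCollectB rows key) (fun x => x) false).foldl pvDedupStep []

-- ===== PRECONDITION & SPEC =====
def Spec_unique_non_empty_upper (rows : List (List (String × String))) (key : String) (out : List String) : Prop := out = unique_non_empty_upper_alt rows key
instance (rows : List (List (String × String))) (key : String) (out : List String) : Decidable (Spec_unique_non_empty_upper rows key out) := by unfold Spec_unique_non_empty_upper; infer_instance

-- ===== CLAIM (what is proved, stated in full; the proofs are below) =====
def Claim_equal_unique_non_empty_upper : Prop := ∀ (rows : List (List (String × String))) (key : String), Dom_unique_non_empty_upper rows key → Spec_unique_non_empty_upper rows key (unique_non_empty_upper rows key)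

-- ===== LEMMAS AND PROOFS =====

-- any member of a (·<·)-pairwise list is ≤ its last element
theorem pv_mem_le_getLast {out : List String} {a last : String}
    (hp : out.Pairwise (· < ·)) (ha : a ∈ out) (hl : out.getLast? = some last) : a ≤ last := by
  induction out with
  | nil => cases ha
  | cons x xs ih =>
    cases xs with
    | nil =>
      simp only [List.mem_singleton] at ha
      simp only [List.getLast?_singleton, Option.some.injEq] at hl
      subst ha; subst hl; exact le_refl _
    | cons y ys =>
      have hl' : (y :: ys).getLast? = some last := by
        simpa [List.getLast?_cons_cons] using hl
      rcases List.mem_cons.1 ha with rfl | ha'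
      · have hmem : last ∈ y :: ys := List.mem_of_getLast? hl'
        exact le_of_lt ((List.pairwise_cons.1 hp).1 last hmem)
      · exact ih (List.pairwise_cons.1 hp).2 ha' hl'

-- invariant of the dedup fold over a ≤-sorted suffix
theorem pv_dedup_invariant (xs : List String) :
    ∀ (out : List String), xs.Pairwise (· ≤ ·) → out.Pairwise (· < ·) →
      (∀ a ∈ out, ∀ b ∈ xs, a ≤ b) →
      (xs.foldl pvDedupStep out).Pairwise (· < ·) ∧
      (∀ x, x ∈ xs.foldl pvDedupStep out ↔ x ∈ out ∨ x ∈ xs) := by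
  induction xs with
  | nil => intro out _ hout _; simpa using hout
  | cons v xs ih =>
    intro out hxs hout hle
    have hxs' := (List.pairwise_cons.1 hxs).2
    have hvxs := (List.pairwise_cons.1 hxs).1
    simp only [List.foldl_cons]
    by_cases hc : out ≠ [] ∧ out.getLast? = some v
    · have hstep : pvDedupStep out v = out := by simp [pvDedupStep, hc]
      rw [hstep]
      have hv_mem : v ∈ out := List.mem_of_getLast? hc.2
      have hrec := ih out hxs' hout (fun a ha b hb => hle a ha b (List.mem_cons_of_mem _ hb))
      refine ⟨hrec.1, fun x => ?_⟩
      rw [hrec.2]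
      constructor
      · rintro (h | h)
        · exact Or.inl h
        · exact Or.inr (List.mem_cons_of_mem _ h)
      · rintro (h | h)
        · exact Or.inl h
        · rcases List.mem_cons.1 h with rfl | h'
          · exact Or.inl hv_mem
          · exact Or.inr h'
    · have hstep : pvDedupStep out v = out ++ [v] := by simp [pvDedupStep, hc]
      rw [hstep]
      have hall_lt : ∀ a ∈ out, a < v := by
        intro a ha
        have hne : out ≠ [] := by intro h; subst h; cases ha
        obtain ⟨last, hlast⟩ : ∃ l, out.getLast? = some l := by
          cases h : out.getLast? with
          | none => exact absurd (List.getLast?_eq_none_iff.1 h) hne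
          | some l => exact ⟨l, rfl⟩
        have halast : a ≤ last := pv_mem_le_getLast hout ha hlast
        have hlastv : last ≤ v := hle last (List.mem_of_getLast? hlast) v List.mem_cons_self
        have hlastne : last ≠ v := fun h => hc ⟨hne, h ▸ hlast⟩
        exact lt_of_le_of_lt halast (lt_of_le_of_ne hlastv hlastne)
      have hout' : (out ++ [v]).Pairwise (· < ·) := by
        rw [List.pairwise_append]
        refine ⟨hout, List.pairwise_singleton _ _, fun a ha b hb => ?_⟩
        simp only [List.mem_singleton] at hb
        subst hb; exact hall_lt a ha
      have hle' : ∀ a ∈ out ++ [v], ∀ b ∈ xs, a ≤ b := by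
        intro a ha b hb
        rcases List.mem_append.1 ha with h | h
        · exact hle a h b (List.mem_cons_of_mem _ hb)
        · simp only [List.mem_singleton] at h; subst h; exact hvxs b hb
      have hrec := ih (out ++ [v]) hxs' hout' hle'
      refine ⟨hrec.1, fun x => ?_⟩
      rw [hrec.2]
      simp only [List.mem_append, List.mem_cons]
      tauto

-- A's cleaned list (filter+map form of the comprehension) equals B's collected list
theorem pv_collect_eq (rows : List (List (String × String))) (key : String) :
    pvCollectB rows key =
      (rows.filter (fun row => PySem.Str.strip (pvGetOrEmpty row key) ≠ "")).map
        (fun row => PySem.Str.upper (PySem.Str.strip (pvGetOrEmpty row key))) := by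
  unfold pvCollectB
  have h := PySem.List.foldl_append_if (l := rows)
    (p := fun row => !decide (PySem.Str.strip (pvGetOrEmpty row key) = ""))
    (f := fun row => PySem.Str.upper (PySem.Str.strip (pvGetOrEmpty row key)))
    (acc := [])
  simp only [List.nil_append] at h
  rw [show (fun (vals : List String) (row : List (String × String)) =>
      let cleaned := PySem.Str.strip (pvGetOrEmpty row key)
      if cleaned = "" then vals else vals ++ [PySem.Str.upper cleaned]) =
    (fun vals row => if (!decide (PySem.Str.strip (pvGetOrEmpty row key) = "")) = true
      then vals ++ [PySem.Str.upper (PySem.Str.strip (pvGetOrEmpty row key))] else vals) from by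
      funext vals row
      by_cases hcl : PySem.Str.strip (pvGetOrEmpty row key) = "" <;> simp [hcl]]
  rw [h]
  congr 1
  apply List.filter_congr
  intro row _
  by_cases hcl : PySem.Str.strip (pvGetOrEmpty row key) = "" <;> simp [hcl]

-- ===== VERDICT (by name: the statement is the Claim_ definition above) =====
theorem unique_non_empty_upper_spec : Claim_equal_unique_non_empty_upper := by
  intro rows key _
  unfold Spec_unique_non_empty_upper unique_non_empty_upper unique_non_empty_upper_alt
  rw [pv_collect_eq]
  set L := (rows.filter (fun row => PySem.Str.strip (pvGetOrEmpty row key) ≠ "")).map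
      (fun row => PySem.Str.upper (PySem.Str.strip (pvGetOrEmpty row key))) with hL
  set S := PySem.List.sorted L (fun x => x) false with hS
  have hSpair : S.Pairwise (· ≤ ·) := by
    have := PySem.List.sorted_pairwise (xs := L) (key := fun x => x)
    simpa using this
  have hinv := pv_dedup_invariant S [] hSpair (by simp) (by intro a ha; cases ha)
  set D := S.foldl pvDedupStep [] with hD
  have hDpair : D.Pairwise (· < ·) := hinv.1
  have hDmem : ∀ x, x ∈ D ↔ x ∈ L := by
    intro x
    rw [hinv.2]
    simp [hS, PySem.List.mem_sorted]
  apply PySem.List.sorted_eq_of_perm_of_pairwise_lt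
  · apply (List.perm_ext_iff_of_nodup
      (hDpair.imp (fun h => ne_of_lt h)) (PySem.Set.nodup_ofList L)).2
    intro a
    rw [hDmem, PySem.Set.mem_ofList]
  · simpa using hDpair
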